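-- pv_equiv track=rewrite | github.com/arllence/csep-backend | user_manager/utils/user_util.py | get_role_from_roles
-- ===== SOURCE A (Python) =====
-- def get_role_from_roles(roles):
--     role = None
--     for item in roles:
--         if 'LEAD' not in item:
--             if 'CHIEF' not in item:
--                 role = item
--             else:
--                 role = 'CHIEF_EVALUATOR'
--         else:
--             if item == 'LEAD_INNOVATION_MANAGER':
--                 role = 'LEAD_INNOVATION_MANAGER'
--
--     return role
-- ===== SOURCE B (Python) =====
-- def get_role_from_roles(roles):
--     for item in reversed(roles):
--         if 'LEAD' not in item or item == 'LEAD_INNOVATION_MANAGER':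
--             if item == 'LEAD_INNOVATION_MANAGER':
--                 return 'LEAD_INNOVATION_MANAGER'
--             if 'CHIEF' in item:
--                 return 'CHIEF_EVALUATOR'
--             return item
--     return None
-- ===== Notes on version B (the rewrite author's own statement) =====
-- stated objective: idiomatic
-- what changed: Replaces A's forward accumulate-the-last-match fold with a reverse scan that returns on the first effective role, so later items are never overwritten and the scan can stop early.
import Mathlib
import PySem

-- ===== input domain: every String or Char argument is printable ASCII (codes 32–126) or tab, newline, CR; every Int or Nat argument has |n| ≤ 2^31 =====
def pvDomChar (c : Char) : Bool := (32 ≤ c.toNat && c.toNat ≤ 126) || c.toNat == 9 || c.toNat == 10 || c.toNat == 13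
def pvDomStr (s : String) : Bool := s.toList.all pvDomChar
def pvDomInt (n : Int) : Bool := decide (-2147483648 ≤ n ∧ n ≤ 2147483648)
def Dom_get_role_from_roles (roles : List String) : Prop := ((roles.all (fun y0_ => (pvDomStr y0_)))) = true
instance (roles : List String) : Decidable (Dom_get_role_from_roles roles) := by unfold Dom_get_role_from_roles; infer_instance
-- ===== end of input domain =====

-- B changes A's forward keep-the-last-match fold into a reverse scan returning the first
-- effective role (idiomatic early exit); return values are proved equal on all inputs.

-- ===== PORT A =====
-- one iteration of A's loop body (literal transliteration of the branch structure)
def pvAStep (role : Option String) (item : String) : Option String :=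
  if !(PySem.Str.isIn "LEAD" item) then
    if !(PySem.Str.isIn "CHIEF" item) then some item
    else some "CHIEF_EVALUATOR"
  else
    if item == "LEAD_INNOVATION_MANAGER" then some "LEAD_INNOVATION_MANAGER"
    else role

def get_role_from_roles (roles : List String) : Option String :=
  roles.foldl pvAStep none

-- ===== PORT B =====
-- Source B's test "'LEAD' not in item or item == 'LEAD_INNOVATION_MANAGER'"
def pvEff (item : String) : Bool :=
  !(PySem.Str.isIn "LEAD" item) || item == "LEAD_INNOVATION_MANAGER"

-- Source B's loop over reversed(roles) with early return
def pvFindRole : List String → Option String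
  | [] => none
  | item :: rest =>
    if pvEff item then
      if item == "LEAD_INNOVATION_MANAGER" then some "LEAD_INNOVATION_MANAGER"
      else if PySem.Str.isIn "CHIEF" item then some "CHIEF_EVALUATOR"
      else some item
    else pvFindRole rest

def get_role_from_roles_alt (roles : List String) : Option String :=
  pvFindRole roles.reverse

-- ===== PRECONDITION & SPEC =====
def Spec_get_role_from_roles (roles : List String) (out : Option String) : Prop := out = get_role_from_roles_alt roles
instance (roles : List String) (out : Option String) : Decidable (Spec_get_role_from_roles roles out) := by unfold Spec_get_role_from_roles; infer_instance

-- ===== CLAIM (what is proved, stated in full; the proofs are below) =====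
def Claim_equal_get_role_from_roles : Prop := ∀ (roles : List String), Dom_get_role_from_roles roles → Spec_get_role_from_roles roles (get_role_from_roles roles)

-- ===== LEMMAS AND PROOFS =====

-- the value B produces for one effective item
def pvMapRole (item : String) : String :=
  if item == "LEAD_INNOVATION_MANAGER" then "LEAD_INNOVATION_MANAGER"
  else if PySem.Str.isIn "CHIEF" item then "CHIEF_EVALUATOR"
  else item

lemma pvFindRole_eq (l : List String) :
    pvFindRole l = match l with
      | [] => none
      | item :: rest => if pvEff item then some (pvMapRole item) else pvFindRole rest := by
  cases l with
  | nil => rfl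
  | cons a t =>
    simp only [pvFindRole, pvMapRole]
    by_cases h : pvEff a = true <;>
      by_cases hM : a = "LEAD_INNOVATION_MANAGER" <;>
        by_cases hC : PySem.Str.isIn "CHIEF" a = true <;> simp_all

-- A's loop body, rewritten through B's predicate and mapping
lemma pvAStep_eq (role : Option String) (item : String) :
    pvAStep role item = if pvEff item then some (pvMapRole item) else role := by
  unfold pvAStep pvEff pvMapRole
  by_cases hL : PySem.Str.isIn "LEAD" item = true <;>
    by_cases hM : item = "LEAD_INNOVATION_MANAGER" <;>
      by_cases hC : PySem.Str.isIn "CHIEF" item = true <;> simp_all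
  -- remaining cases: item = LIM but "LEAD" not in item — impossible
  all_goals (subst hM; revert hL; decide)

lemma pvFindRole_append (xs : List String) (a : String) :
    pvFindRole (xs ++ [a]) =
      match pvFindRole xs with
      | some x => some x
      | none => if pvEff a then some (pvMapRole a) else none := by
  induction xs with
  | nil =>
    rw [List.nil_append, pvFindRole_eq]
    rfl
  | cons b t ih =>
    rw [List.cons_append, pvFindRole_eq, pvFindRole_eq (b :: t)]
    by_cases h : pvEff b = true <;> simp [h, ih]

lemma pvFoldl_eq (l : List String) (init : Option String) :
    l.foldl pvAStep init =
      match pvFindRole l.reverse with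
      | some x => some x
      | none => init := by
  induction l generalizing init with
  | nil => rfl
  | cons a t ih =>
    rw [List.foldl_cons, ih, List.reverse_cons, pvFindRole_append]
    cases h : pvFindRole t.reverse with
    | some x => rfl
    | none => rw [pvAStep_eq]; by_cases he : pvEff a = true <;> simp [he]

-- ===== VERDICT (by name: the statement is the Claim_ definition above) =====
theorem get_role_from_roles_spec : Claim_equal_get_role_from_roles := by
  intro roles _
  unfold Spec_get_role_from_roles get_role_from_roles get_role_from_roles_alt
  rw [pvFoldl_eq]
  cases h : pvFindRole roles.reverse <;> simp
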